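-- pv_equiv track=rewrite | github.com/DGTV11/LCCL-PS-1-to-PS-8 | PS 5/ex120.py | list2english
-- ===== SOURCE A (Python) =====
-- def list2english(_list):
--     eng = str()
--     for i, item in enumerate(_list):
--         if i == len(_list) - 1 and len(_list) != 1:
--             eng += f"and {item}"
--         elif len(_list) == 1:
--             eng = item
--         elif i == len(_list) - 2:
--             eng += f"{item} "
--         else:
--             eng += f"{item}, "
--     return eng
-- ===== SOURCE B (Python) =====
-- def list2english(_list):
--     if not _list:
--         return ""
--     if len(_list) == 1:
--         return _list[0]
--     return ", ".join(str(x) for x in _list[:-1]) + " and " + str(_list[-1])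
-- ===== Notes on version B (the rewrite author's own statement) =====
-- stated objective: simpler
-- what changed: Replaces the per-index branch selection inside one string-accumulation loop by explicit base cases plus a slice-based decomposition: ', '.join over all but the last element, then append ' and ' plus the last element (str.join avoids repeated += concatenation).
import Mathlib
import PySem

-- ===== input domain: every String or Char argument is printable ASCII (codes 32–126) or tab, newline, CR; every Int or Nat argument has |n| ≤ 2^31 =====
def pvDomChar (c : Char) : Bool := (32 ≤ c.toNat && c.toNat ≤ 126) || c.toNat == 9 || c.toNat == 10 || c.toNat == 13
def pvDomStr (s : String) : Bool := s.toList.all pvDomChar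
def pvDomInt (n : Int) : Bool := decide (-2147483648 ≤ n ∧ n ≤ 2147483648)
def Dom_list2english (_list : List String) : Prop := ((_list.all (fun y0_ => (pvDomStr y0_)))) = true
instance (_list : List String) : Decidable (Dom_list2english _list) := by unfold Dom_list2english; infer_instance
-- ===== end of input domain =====

-- B replaces A's single accumulation loop with explicit base cases and a
-- slice-based 'join the front with ", ", append " and " + last' decomposition (objective: simpler).

-- ===== PORT A =====
def list2english (_list : List String) : String :=
  (PySem.List.enumerate _list 0).foldl
    (fun eng p =>
      if p.1 == (_list.length : Int) - 1 && !((_list.length : Int) == 1) then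
        eng ++ ("and " ++ p.2)
      else if (_list.length : Int) == 1 then
        p.2
      else if p.1 == (_list.length : Int) - 2 then
        eng ++ (p.2 ++ " ")
      else
        eng ++ (p.2 ++ ", "))
    ""

-- ===== PORT B =====
def list2english_alt (_list : List String) : String :=
  match _list with
  | [] => ""
  | [x] => x
  | x :: y :: rest =>
      (PySem.Str.join ", " ((x :: y :: rest).dropLast) ++ " and ")
        ++ (y :: rest).getLast (by simp)

-- ===== PRECONDITION & SPEC =====
def Spec_list2english (_list : List String) (out : String) : Prop := out = list2english_alt _list
instance (_list : List String) (out : String) : Decidable (Spec_list2english _list out) := by unfold Spec_list2english; infer_instance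

-- ===== CLAIM (what is proved, stated in full; the proofs are below) =====
def Claim_equal_list2english : Prop := ∀ (_list : List String), Dom_list2english _list → Spec_list2english _list (list2english _list)

-- ===== LEMMAS AND PROOFS =====

-- closed form for A's fold over the tail of the list
def pvTailFmt : List String → String
  | [] => ""
  | [x] => "and " ++ x
  | x :: rest => (x ++ (if rest.length == 1 then " " else ", ")) ++ pvTailFmt rest

theorem pvTailFmt_cons (x y : String) (r : List String) :
    pvTailFmt (x :: y :: r)
      = (x ++ (if (y :: r).length == 1 then " " else ", ")) ++ pvTailFmt (y :: r) := by
  rfl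

theorem pv_join_cc (s x y : String) (r : List String) :
    PySem.Str.join s (x :: y :: r) = x ++ (s ++ PySem.Str.join s (y :: r)) := by
  simp [PySem.Str.join, PySem.Chars.join_cons_cons, String.ofList_append]

theorem pv_aux (n : Int) (t : List String) : ∀ (k : Int) (acc : String),
    k + t.length = n → t ≠ [] → n ≠ 1 →
    (PySem.List.enumerate t k).foldl
      (fun eng p =>
        if p.1 == n - 1 && !(n == 1) then eng ++ ("and " ++ p.2)
        else if n == 1 then p.2
        else if p.1 == n - 2 then eng ++ (p.2 ++ " ")
        else eng ++ (p.2 ++ ", "))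
      acc = acc ++ pvTailFmt t := by
  induction t with
  | nil => intro _ _ _ h _; exact absurd rfl h
  | cons z t ih =>
    intro k acc hk _ hn1
    cases t with
    | nil =>
      -- z is the last element: k = n - 1
      simp at hk
      simp [PySem.List.enumerate_cons, PySem.List.enumerate_nil, pvTailFmt, hk, hn1]
      omega
    | cons w t' =>
      have hklt : k ≠ n - 1 := by simp at hk; omega
      cases t' with
      | nil =>
        have h1 : k = n - 2 := by simp at hk; omega
        have h2 : k + 1 = n - 1 := by omega
        simp [PySem.List.enumerate_cons, PySem.List.enumerate_nil, pvTailFmt, hn1, h1,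
          String.append_assoc]
        intro h
        exact absurd (by omega) h
      | cons a b =>
        have hne : (w :: a :: b) ≠ ([] : List String) := by simp
        have hk' : (k + 1) + ((w :: a :: b).length : Int) = n := by simp at hk ⊢; omega
        have hb2 : k ≠ n - 2 := by simp at hk; omega
        rw [PySem.List.enumerate_cons, List.foldl_cons]
        have hstep : (if (k == n - 1 && !(n == 1)) = true then acc ++ ("and " ++ z)
            else if (n == 1) = true then z
            else if (k == n - 2) = true then acc ++ (z ++ " ")
            else acc ++ (z ++ ", ")) = acc ++ (z ++ ", ") := by
          simp [hklt, hn1, hb2]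
        simp only [hstep]
        rw [ih (k + 1) (acc ++ (z ++ ", ")) hk' hne hn1]
        simp [pvTailFmt_cons, String.append_assoc]

-- pvTailFmt equals B's join-based form
theorem pv_tailFmt_eq (rest : List String) : ∀ (x y : String),
    pvTailFmt (x :: y :: rest)
      = (PySem.Str.join ", " ((x :: y :: rest).dropLast) ++ " and ")
          ++ (y :: rest).getLast (by simp) := by
  induction rest with
  | nil =>
    intro x y
    have hlit : (" " : String) ++ "and " = " and " := by decide
    rw [pvTailFmt_cons]
    show (x ++ " ") ++ pvTailFmt [y] = _
    rw [pvTailFmt]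
    simp [PySem.Str.join, PySem.Chars.join_singleton, String.append_assoc]
    conv_rhs => rw [← hlit]
    rw [String.append_assoc]
  | cons a b ih =>
    intro x y
    rw [pvTailFmt_cons]
    rw [if_neg (by simp)]
    rw [ih y a]
    have hdl : (x :: y :: a :: b).dropLast = x :: y :: (a :: b).dropLast := by
      simp [List.dropLast_cons₂]
    rw [hdl, pv_join_cc]
    have hgl : (y :: a :: b).getLast (by simp) = (a :: b).getLast (by simp) := by
      simp [List.getLast_cons]
    rw [hgl]
    simp [String.append_assoc]

-- ===== VERDICT (by name: the statement is the Claim_ definition above) =====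
theorem list2english_spec : Claim_equal_list2english := by
  intro l _
  unfold Spec_list2english list2english list2english_alt
  match l with
  | [] => rfl
  | [x] => simp [PySem.List.enumerate_cons, PySem.List.enumerate_nil]
  | x :: y :: rest =>
    rw [pv_aux ((x :: y :: rest).length : Int) (x :: y :: rest) 0 "" (by simp) (by simp)
      (by simp; omega)]
    rw [pv_tailFmt_eq]
    simp
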